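-- pv_equiv track=rewrite | github.com/mbartnicki80/WDI | zestaw6/zad31zestaw6.py | podzielniki
-- ===== SOURCE A (Python) =====
-- def podzielniki(liczba, t):
--
--     dzielnik = 2
--     i = 0
--
--     while liczba>1:
--         if liczba%dzielnik==0:
--             t[i]=dzielnik
--             i += 1
--             while liczba%dzielnik==0:
--                 liczba //= dzielnik
--         dzielnik += 1
--
--     return t
-- ===== SOURCE B (Python) =====
-- def podzielniki(liczba, t):
--     facs = []
--     n = liczba
--     d = 2
--     while d * d <= n:
--         if n % d == 0:
--             if not facs or facs[-1] != d:
--                 facs.append(d)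
--             n //= d
--         else:
--             d += 1
--     if n > 1 and (not facs or facs[-1] != n):
--         facs.append(n)
--     for j, p in enumerate(facs):
--         t[j] = p
--     return t
-- ===== Notes on version B (the rewrite author's own statement) =====
-- stated objective: alternative
-- what changed: B runs one single loop up to sqrt(n) that divides out one prime factor per iteration (advancing d only when it no longer divides, deduplicating by comparing with the last collected factor) and appends the leftover cofactor as the final prime, collecting the factors in a list written into t at the end, instead of A's scan of every candidate divisor up to the largest prime factor with a nested strip-out loop.
import Mathlib
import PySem

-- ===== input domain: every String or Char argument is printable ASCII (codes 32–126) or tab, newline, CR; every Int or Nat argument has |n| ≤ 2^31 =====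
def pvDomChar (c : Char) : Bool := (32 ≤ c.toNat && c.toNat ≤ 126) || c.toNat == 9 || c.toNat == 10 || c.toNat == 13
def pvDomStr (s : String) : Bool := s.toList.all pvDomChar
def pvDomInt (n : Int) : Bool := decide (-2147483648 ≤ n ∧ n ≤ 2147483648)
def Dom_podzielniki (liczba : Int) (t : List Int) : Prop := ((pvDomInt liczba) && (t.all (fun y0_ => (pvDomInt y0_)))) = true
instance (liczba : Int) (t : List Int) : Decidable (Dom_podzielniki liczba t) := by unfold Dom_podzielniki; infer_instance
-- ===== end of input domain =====

-- B replaces A's scan over every candidate divisor (with a nested strip-out loop) by a single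
-- loop up to sqrt(liczba) dividing out one factor per iteration, deduplicating against the last
-- collected factor, with the leftover cofactor appended as the last prime (objective: alternative).
-- Both A and B mutate the argument list t in place in Python (writing the factors into its
-- prefix); the equivalence proved is about the returned value.

-- ===== PORT A =====
-- inner 'while liczba % dzielnik == 0: liczba //= dzielnik'; fuel-bounded, fuel n.toNat is
-- proved sufficient below (each division shrinks liczba)
def aInner (n d : Int) : Nat → Int
  | 0 => n
  | f+1 => if PySem.Int.mod n d = 0 then aInner (PySem.Int.floordiv n d) d f else n

-- outer 'while liczba > 1' loop; one fuel unit per iteration (dzielnik grows by 1 each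
-- iteration and never passes the initial liczba, so liczba.toNat + 1 units suffice, proved below)
def aOuter (n d : Int) (i : Nat) (t : List Int) : Nat → List Int
  | 0 => t
  | f+1 =>
    if 1 < n then
      if PySem.Int.mod n d = 0 then
        aOuter (aInner n d n.toNat) (d+1) (i+1) (t.set i d) f
      else aOuter n (d+1) i t f
    else t

def podzielniki (liczba : Int) (t : List Int) : List Int :=
  aOuter liczba 2 0 t (liczba.toNat + 1)

-- ===== PORT B =====
-- B's single 'while d * d <= n' loop: one division per iteration, d advances only in the
-- else branch, dedup by comparing with the last collected factor; fuel 2*n+1 is proved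
-- sufficient below (each iteration shrinks the measure 2n - d)
def bLoop (n d : Int) (facs : List Int) : Nat → Int × List Int
  | 0 => (n, facs)
  | f+1 =>
    if d * d ≤ n then
      if PySem.Int.mod n d = 0 then
        bLoop (PySem.Int.floordiv n d) d
          (if facs.getLast? = some d then facs else facs ++ [d]) f
      else bLoop n (d+1) facs f
    else (n, facs)

def podzielniki_alt (liczba : Int) (t : List Int) : List Int :=
  let r := bLoop liczba 2 [] (2 * liczba.toNat + 1)
  let facs := if 1 < r.1 ∧ r.2.getLast? ≠ some r.1 then r.2 ++ [r.1] else r.2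
  (PySem.List.enumerate facs 0).foldl (fun acc jp => acc.set jp.1.toNat jp.2) t

-- ===== PRECONDITION & SPEC =====
-- the number of distinct prime factors of n, in closed form: primes up to a power-of-two
-- bound b ≥ √n that divide n, plus one if some prime factor exceeds b (equivalently, n does
-- not divide the product of the small prime powers; exponents of n < 2^32 never exceed 32)
def pvOmega (n : Nat) : Nat :=
  if n ≤ 1 then 0 else
    let b := 2 ^ ((List.range 33).countP (fun k => 4 ^ k ≤ n))
    let ps := (List.range (b + 1)).filter (fun p => decide (Nat.Prime p) && decide (p ∣ n))
    ps.length + (if n ∣ (ps.map (fun p => p ^ 32)).prod then 0 else 1)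

-- Pre_ excludes exactly the inputs on which Python A raises IndexError: t shorter than the
-- number of distinct prime factors of liczba (Python B raises IndexError there too).
def Pre_podzielniki (liczba : Int) (t : List Int) : Prop :=
  pvOmega liczba.toNat ≤ t.length
instance (liczba : Int) (t : List Int) : Decidable (Pre_podzielniki liczba t) := by
  unfold Pre_podzielniki; infer_instance

def pvWitness_podzielniki : Int × List Int := (12, [0, 0, 0])

def Spec_podzielniki (liczba : Int) (t : List Int) (out : List Int) : Prop := out = podzielniki_alt liczba t
instance (liczba : Int) (t : List Int) (out : List Int) : Decidable (Spec_podzielniki liczba t out) := by unfold Spec_podzielniki; infer_instance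

-- ===== CLAIM (what is proved, stated in full; the proofs are below) =====
def Claim_equal_podzielniki : Prop := ∀ (liczba : Int) (t : List Int), Dom_podzielniki liczba t → Pre_podzielniki liczba t → Spec_podzielniki liczba t (podzielniki liczba t)

-- ===== LEMMAS AND PROOFS =====

theorem ediv_lt_self' (a b : Int) (ha : 0 < a) (hb : 1 < b) : a / b < a := by
  have hq : 0 ≤ a / b := Int.ediv_nonneg (by omega) (by omega)
  have hm := Int.emod_nonneg a (by omega : b ≠ 0)
  have he := Int.ediv_add_emod a b
  have h2 : 2 * (a / b) ≤ b * (a / b) := mul_le_mul_of_nonneg_right (by omega) hq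
  omega

theorem ediv_half' (a b : Int) (ha : 0 ≤ a) (hb : 2 ≤ b) : 2 * (a / b) ≤ a := by
  have hq : 0 ≤ a / b := Int.ediv_nonneg (by omega) (by omega)
  have hm := Int.emod_nonneg a (by omega : b ≠ 0)
  have he := Int.ediv_add_emod a b
  have h2 : 2 * (a / b) ≤ b * (a / b) := mul_le_mul_of_nonneg_right (by omega) hq
  omega

theorem ediv_pos' (a b : Int) (hb : 0 < b) (hba : b ≤ a) : 0 < a / b := by
  by_contra h
  push_neg at h
  have he := Int.ediv_add_emod a b
  have hm := Int.emod_lt_of_pos a hb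
  have : b * (a / b) ≤ 0 := mul_nonpos_of_nonneg_of_nonpos (le_of_lt hb) h
  omega

-- reference function: divide out all factors d from n
def stripI (n d : Int) : Int :=
  if h : 0 < n ∧ 2 ≤ d ∧ n % d = 0 then stripI (n / d) d else n
termination_by n.toNat
decreasing_by
  obtain ⟨h1, h2, h3⟩ := h
  have hd : n / d < n := ediv_lt_self' n d h1 (by omega)
  have : 0 ≤ n / d := Int.ediv_nonneg (by omega) (by omega)
  omega

theorem stripI_pos (n d : Int) (hn : 0 < n) : 0 < stripI n d := by
  induction n using stripI.induct (d := d) with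
  | case1 n h ih =>
      rw [stripI, dif_pos h]
      obtain ⟨h1, h2, h3⟩ := h
      exact ih (ediv_pos' n d (by omega) (Int.le_of_dvd h1 (Int.dvd_of_emod_eq_zero h3)))
  | case2 n h => rw [stripI, dif_neg h]; exact hn

theorem stripI_le (n d : Int) (hn : 0 < n) : stripI n d ≤ n := by
  induction n using stripI.induct (d := d) with
  | case1 n h ih =>
      rw [stripI, dif_pos h]
      obtain ⟨h1, h2, h3⟩ := h
      have hp : 0 < n / d := ediv_pos' n d (by omega) (Int.le_of_dvd h1 (Int.dvd_of_emod_eq_zero h3))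
      have h4 := ih hp
      have h5 : n / d < n := ediv_lt_self' n d h1 (by omega)
      omega
  | case2 n h => rw [stripI, dif_neg h]

theorem stripI_half (n d : Int) (hn : 0 < n) (hd : 2 ≤ d) (hm : n % d = 0) :
    2 * stripI n d ≤ n := by
  rw [stripI, dif_pos ⟨hn, hd, hm⟩]
  have hp : 0 < n / d := ediv_pos' n d (by omega) (Int.le_of_dvd hn (Int.dvd_of_emod_eq_zero hm))
  have h1 := stripI_le (n / d) d hp
  have h2 := ediv_half' n d (by omega) hd
  omega

theorem stripI_dvd (n d : Int) : stripI n d ∣ n := by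
  induction n using stripI.induct (d := d) with
  | case1 n h ih =>
      rw [stripI, dif_pos h]
      obtain ⟨h1, h2, h3⟩ := h
      have hdvd : d ∣ n := Int.dvd_of_emod_eq_zero h3
      have hq : n / d ∣ n := ⟨d, (Int.ediv_mul_cancel hdvd).symm⟩
      exact dvd_trans ih hq
  | case2 n h => rw [stripI, dif_neg h]

theorem stripI_not_dvd (n d : Int) (hn : 0 < n) (hd : 2 ≤ d) : ¬ d ∣ stripI n d := by
  induction n using stripI.induct (d := d) with
  | case1 n h ih =>
      rw [stripI, dif_pos h]
      obtain ⟨h1, h2, h3⟩ := h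
      exact ih (ediv_pos' n d (by omega) (Int.le_of_dvd h1 (Int.dvd_of_emod_eq_zero h3)))
  | case2 n h =>
      rw [stripI, dif_neg h]
      intro hdvd
      exact h ⟨hn, hd, Int.emod_eq_zero_of_dvd hdvd⟩

-- reference: the list of distinct prime factors of n in increasing order, from candidate d on
def gfac (n d : Int) : List Int :=
  if h : 1 < n ∧ 2 ≤ d ∧ d ≤ n then
    if hm : n % d = 0 then d :: gfac (stripI n d) (d + 1) else gfac n (d + 1)
  else []
termination_by (2 * n - d).toNat
decreasing_by
  · obtain ⟨h1, h2, h3⟩ := h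
    have hs := stripI_half n d (by omega) h2 hm
    have hp := stripI_pos n d (by omega)
    omega
  · obtain ⟨h1, h2, h3⟩ := h
    omega

-- every element produced by gfac n d is at least d
theorem gfac_ge (n d : Int) : ∀ x ∈ gfac n d, d ≤ x := by
  induction n, d using gfac.induct with
  | case1 n d h hm ih =>
      rw [gfac, dif_pos h, dif_pos hm]
      intro x hx
      rcases List.mem_cons.mp hx with hx | hx
      · omega
      · have := ih x hx; omega
  | case2 n d h hm ih =>
      rw [gfac, dif_pos h, dif_neg hm]
      intro x hx
      have := ih x hx; omega
  | case3 n d h =>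
      rw [gfac, dif_neg h]
      intro x hx
      exact absurd hx (List.not_mem_nil)

-- the loop invariant: no candidate below d divides n
def inv (n d : Int) : Prop := ∀ k : Int, 2 ≤ k → k < d → ¬ k ∣ n

theorem inv_le (n d : Int) (hn : 1 < n) (h : inv n d) : d ≤ n := by
  by_contra h'
  push_neg at h'
  exact h n (by omega) h' dvd_rfl

theorem inv_step_div (n d : Int) (hn : 0 < n) (hd : 2 ≤ d) (h : inv n d) :
    inv (stripI n d) (d + 1) := by
  intro k hk hkd
  by_cases hkd' : k < d
  · intro hdvd; exact h k hk hkd' (dvd_trans hdvd (stripI_dvd n d))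
  · have hkeq : k = d := by omega
    subst hkeq
    exact stripI_not_dvd n k hn hd

theorem inv_step_nodiv (n d : Int) (hm : ¬ d ∣ n) (h : inv n d) : inv n (d + 1) := by
  intro k hk hkd
  by_cases h' : k < d
  · exact h k hk h'
  · have hkeq : k = d := by omega
    subst hkeq
    exact hm

-- dividing by d once preserves the invariant at the same d
theorem inv_divd (n d : Int) (h : inv n d) (hq : n / d ∣ n) : inv (n / d) d := by
  intro k hk hkd hdvd
  exact h k hk hkd (dvd_trans hdvd hq)

theorem gfac_self (n : Int) (hn : 1 < n) : gfac n n = [n] := by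
  rw [gfac, dif_pos ⟨hn, by omega, le_refl n⟩, dif_pos (show n % n = 0 by simp)]
  have hs1 : stripI n n = 1 := by
    rw [stripI, dif_pos ⟨by omega, by omega, (show n % n = 0 by simp)⟩,
        Int.ediv_self (by omega : n ≠ 0), stripI,
        dif_neg (by
          intro h
          have : (1 : Int) % n = 1 := Int.emod_eq_of_lt (by omega) (by omega)
          omega)]
  rw [hs1, gfac, dif_neg (by omega)]

-- a number with no divisor below d and none below its square root is its own only factor
theorem gfac_prime (n : Int) (hn : 1 < n) : ∀ (m : Nat) (d : Int), (n - d).toNat ≤ m →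
    2 ≤ d → n < d * d → inv n d → gfac n d = [n] := by
  intro m
  induction m with
  | zero =>
      intro d hm hd hdd hinv
      have hdn := inv_le n d hn hinv
      have hde : d = n := by omega
      subst hde
      exact gfac_self d hn
  | succ m ih =>
      intro d hm hd hdd hinv
      have hdn := inv_le n d hn hinv
      by_cases hde : d = n
      · subst hde; exact gfac_self d hn
      · have hlt : d < n := lt_of_le_of_ne hdn hde
        have hnd : ¬ d ∣ n := by
          rintro ⟨c, hc⟩
          have hc1 : 0 < c := by nlinarith
          have hcd : c < d := by nlinarith
          have hc2 : 2 ≤ c := by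
            by_contra hcc
            have hc1' : c = 1 := by omega
            have hnd' : n = d := by rw [hc, hc1', mul_one]
            exact hde hnd'.symm
          exact hinv c hc2 hcd ⟨d, by linarith⟩
        have hm0 : ¬ n % d = 0 := fun h => hnd (Int.dvd_of_emod_eq_zero h)
        rw [gfac, dif_pos ⟨hn, hd, hdn⟩, dif_neg hm0]
        have hf1 : (n - (d + 1)).toNat ≤ m := by omega
        have hf2 : n < (d + 1) * (d + 1) := by nlinarith
        exact ih (d + 1) hf1 (by omega) hf2 (inv_step_nodiv n d hnd hinv)

theorem aInner_eq : ∀ (f : Nat) (n d : Int), 0 < n → 2 ≤ d → n.toNat ≤ f →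
    aInner n d f = stripI n d := by
  intro f
  induction f with
  | zero => intro n d hn hd hf; omega
  | succ f ih =>
      intro n d hn hd hf
      simp only [aInner]
      rw [PySem.Int.mod_eq_emod_of_pos (by omega)]
      by_cases hm : n % d = 0
      · rw [if_pos hm, PySem.Int.floordiv_eq_ediv_of_pos (by omega)]
        have hp : 0 < n / d := ediv_pos' n d (by omega) (Int.le_of_dvd hn (Int.dvd_of_emod_eq_zero hm))
        have hlt : n / d < n := ediv_lt_self' n d hn (by omega)
        rw [ih (n / d) d hp hd (by omega)]
        conv_rhs => rw [stripI, dif_pos ⟨hn, hd, hm⟩]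
      · rw [if_neg hm, stripI, dif_neg (fun h => hm h.2.2)]

def writeFrom (t : List Int) (i : Nat) : List Int → List Int
  | [] => t
  | x :: xs => writeFrom (t.set i x) (i + 1) xs

-- A's loop writes exactly gfac n d into t starting at index i
theorem aOuter_eq : ∀ (f : Nat) (n d : Int) (i : Nat) (t : List Int), 2 ≤ d → inv n d →
    (n + 1 - d).toNat ≤ f → aOuter n d i t f = writeFrom t i (gfac n d) := by
  intro f
  induction f with
  | zero =>
      intro n d i t hd hinv hf
      have hn : ¬ 1 < n := fun h => by have := inv_le n d h hinv; omega
      simp only [aOuter]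
      rw [gfac, dif_neg (fun h => hn h.1)]
      rfl
  | succ f ih =>
      intro n d i t hd hinv hf
      simp only [aOuter]
      by_cases hn : 1 < n
      · rw [if_pos hn, PySem.Int.mod_eq_emod_of_pos (by omega)]
        have hdn := inv_le n d hn hinv
        by_cases hm : n % d = 0
        · rw [if_pos hm, aInner_eq n.toNat n d (by omega) hd (le_refl _)]
          have hs2 := stripI_half n d (by omega) hd hm
          have hsp := stripI_pos n d (by omega)
          rw [ih (stripI n d) (d + 1) (i + 1) (t.set i d) (by omega)
              (inv_step_div n d (by omega) hd hinv) (by omega)]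
          conv_rhs => rw [gfac, dif_pos ⟨hn, hd, hdn⟩, dif_pos hm]
          rfl
        · rw [if_neg hm]
          have hnd : ¬ d ∣ n := fun h => hm (Int.emod_eq_zero_of_dvd h)
          rw [ih n (d + 1) i t (by omega) (inv_step_nodiv n d hnd hinv) (by omega)]
          conv_rhs => rw [gfac, dif_pos ⟨hn, hd, hdn⟩, dif_neg hm]
      · rw [if_neg hn, gfac, dif_neg (fun h => hn h.1)]
        rfl

-- the conditional leftover-append B performs after its loop
def bOut (r : Int × List Int) : List Int :=
  if 1 < r.1 ∧ r.2.getLast? ≠ some r.1 then r.2 ++ [r.1] else r.2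

-- drop the head of a list when it equals the remembered last-collected factor
def tailD (o : Option Int) : List Int → List Int
  | [] => []
  | x :: xs => if o = some x then xs else x :: xs

theorem tailD_skip (d : Int) (l : List Int) (h : ∀ x ∈ l, d < x) :
    tailD (some d) l = l := by
  cases l with
  | nil => rfl
  | cons x xs =>
      have := h x (List.mem_cons_self)
      simp only [tailD, if_neg (by intro he; cases he; omega : ¬ some d = some x)]

-- B's loop together with its leftover-append produces facs ++ gfac n d, minus a leading
-- factor already collected as facs' last element
theorem bLoop_eq : ∀ (f : Nat) (n d : Int) (facs : List Int), 2 ≤ d → 0 < n → inv n d →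
    (∀ x, facs.getLast? = some x → x ≤ d) → (2 * n - d).toNat ≤ f →
    bOut (bLoop n d facs f) = facs ++ tailD facs.getLast? (gfac n d) := by
  intro f
  induction f with
  | zero =>
      intro n d facs hd hn hinv hlast hf
      have hn1 : ¬ 1 < n := by
        intro h
        have := inv_le n d h hinv
        omega
      have hc : ¬(1 < n ∧ facs.getLast? ≠ some n) := fun h => hn1 h.1
      show (if 1 < n ∧ facs.getLast? ≠ some n then facs ++ [n] else facs) =
        facs ++ tailD facs.getLast? (gfac n d)
      rw [if_neg hc, gfac, dif_neg (fun h => hn1 h.1)]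
      simp [tailD]
  | succ f ih =>
      intro n d facs hd hn hinv hlast hf
      simp only [bLoop]
      by_cases hdd : d * d ≤ n
      · rw [if_pos hdd]
        have hn1 : 1 < n := by nlinarith
        have hdn : d ≤ n := by nlinarith
        rw [PySem.Int.mod_eq_emod_of_pos (by omega)]
        by_cases hm : n % d = 0
        · rw [if_pos hm, PySem.Int.floordiv_eq_ediv_of_pos (by omega)]
          have hdvd : d ∣ n := Int.dvd_of_emod_eq_zero hm
          have hqd : d ≤ n / d := by
            rw [Int.le_ediv_iff_mul_le (by omega : (0:Int) < d)]
            exact hdd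
          have hq1 : 1 < n / d := by omega
          have hqdvd : n / d ∣ n := ⟨d, (Int.ediv_mul_cancel hdvd).symm⟩
          have hhalf := ediv_half' n d (by omega) hd
          have hstep := ih (n / d) d
            (if facs.getLast? = some d then facs else facs ++ [d])
            hd (by omega) (inv_divd n d hinv hqdvd)
            (by
              intro x hx
              by_cases hc : facs.getLast? = some d
              · rw [if_pos hc] at hx
                rw [hc] at hx
                cases hx; omega
              · rw [if_neg hc] at hx
                rw [List.getLast?_concat] at hx
                cases hx; omega)
            (by omega)
          rw [hstep]
          have hlast' : (if facs.getLast? = some d then facs else facs ++ [d]).getLast? = some d := by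
            by_cases hc : facs.getLast? = some d
            · rw [if_pos hc]; exact hc
            · rw [if_neg hc, List.getLast?_concat]
          rw [hlast']
          -- tailD (some d) (gfac (n/d) d) = gfac (stripI n d) (d+1)
          have hkey : tailD (some d) (gfac (n / d) d) = gfac (stripI n d) (d + 1) := by
            have hstrip : stripI n d = stripI (n / d) d := by
              conv_lhs => rw [stripI, dif_pos ⟨by omega, hd, hm⟩]
            by_cases hm2 : (n / d) % d = 0
            · rw [gfac, dif_pos ⟨hq1, hd, hqd⟩, dif_pos hm2]
              simp only [tailD]
              simp only [if_true]
              rw [hstrip]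
            · have hstrip2 : stripI (n / d) d = n / d := by
                rw [stripI, dif_neg (fun h => hm2 h.2.2)]
              rw [gfac, dif_pos ⟨hq1, hd, hqd⟩, dif_neg hm2]
              rw [tailD_skip d _ (by
                intro x hx
                have := gfac_ge (n / d) (d + 1) x hx
                omega)]
              rw [hstrip, hstrip2]
          rw [hkey]
          conv_rhs => rw [gfac, dif_pos ⟨hn1, hd, hdn⟩, dif_pos hm]
          by_cases hc : facs.getLast? = some d
          · rw [if_pos hc, hc]
            simp only [tailD]
            simp only [if_true]
          · rw [if_neg hc]
            simp only [tailD]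
            rw [if_neg hc, List.append_assoc]
            rfl
        · rw [if_neg hm]
          have hnd : ¬ d ∣ n := fun h => hm (Int.emod_eq_zero_of_dvd h)
          rw [ih n (d + 1) facs (by omega) hn (inv_step_nodiv n d hnd hinv)
              (by intro x hx; have := hlast x hx; omega) (by omega)]
          conv_rhs => rw [gfac, dif_pos ⟨hn1, hd, hdn⟩, dif_neg hm]
      · rw [if_neg hdd]
        by_cases hn1 : 1 < n
        · rw [gfac_prime n hn1 (n - d).toNat d (le_refl _) hd (by omega) hinv]
          simp only [bOut, tailD]
          by_cases hc : facs.getLast? = some n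
          · rw [if_neg (by intro h; exact h.2 hc), if_pos hc]
            simp
          · rw [if_pos ⟨hn1, hc⟩, if_neg hc]
        · have hc : ¬(1 < n ∧ facs.getLast? ≠ some n) := fun h => hn1 h.1
          show (if 1 < n ∧ facs.getLast? ≠ some n then facs ++ [n] else facs) =
            facs ++ tailD facs.getLast? (gfac n d)
          rw [if_neg hc, gfac, dif_neg (fun h => hn1 h.1)]
          simp [tailD]

-- writing an enumerated list with set equals writeFrom
theorem writeFold : ∀ (l : List Int) (t : List Int) (s : Int), 0 ≤ s →
    (PySem.List.enumerate l s).foldl (fun acc jp => acc.set jp.1.toNat jp.2) t =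
      writeFrom t s.toNat l := by
  intro l
  induction l with
  | nil => intro t s hs; simp [PySem.List.enumerate_nil, writeFrom]
  | cons x xs ih =>
      intro t s hs
      rw [PySem.List.enumerate_cons]
      simp only [List.foldl]
      rw [ih (t.set s.toNat x) (s + 1) (by omega)]
      have hts : (s + 1).toNat = s.toNat + 1 := by omega
      rw [hts]
      rfl

-- ===== VERDICT (by name: the statement is the Claim_ definition above) =====
theorem podzielniki_spec : Claim_equal_podzielniki := by
  intro liczba t _ _
  show podzielniki liczba t = podzielniki_alt liczba t
  by_cases hn : 1 < liczba
  · have hinv : inv liczba 2 := fun k hk hkd => absurd hkd (by omega)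
    have hA : podzielniki liczba t = writeFrom t 0 (gfac liczba 2) := by
      unfold podzielniki
      exact aOuter_eq (liczba.toNat + 1) liczba 2 0 t (by omega) hinv (by omega)
    have hB := bLoop_eq (2 * liczba.toNat + 1) liczba 2 [] (by omega) (by omega) hinv
      (by intro x hx; simp at hx) (by omega)
    simp only [List.getLast?_nil] at hB
    have htail : tailD none (gfac liczba 2) = gfac liczba 2 := by
      cases h : gfac liczba 2 with
      | nil => rfl
      | cons x xs => simp [tailD]
    rw [htail, List.nil_append] at hB
    have hpost : podzielniki_alt liczba t =
        (PySem.List.enumerate (bOut (bLoop liczba 2 [] (2 * liczba.toNat + 1))) 0).foldl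
          (fun acc jp => acc.set jp.1.toNat jp.2) t := rfl
    rw [hA, hpost, hB, writeFold (gfac liczba 2) t 0 (le_refl 0)]
    rfl
  · unfold podzielniki podzielniki_alt
    have h4 : ¬ ((2 : Int) * 2 ≤ liczba) := by omega
    simp only [aOuter, bLoop, if_neg hn, if_neg h4]
    simp [hn, PySem.List.enumerate_nil]
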